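-- pv_equiv track=rewrite | github.com/bhavi-321/safe_legal_ai | backend/clause_policy.py | validate_rewrite_output
-- ===== SOURCE A (Python) =====
-- UNSAFE_REWRITE_OUTPUT_TERMS = [
--     "liability shall be limited",
--     "in no event shall",
--     "consequential damages",
--     "punitive damages",
--     "indirect damages",
--     "$",
-- ]
--
-- def validate_rewrite_output(rewritten_text: str) -> bool:
--     """
--     Validate that a rewritten clause does not introduce
--     new legal concepts such as liability caps or damages exclusions.
--     """
--     if not rewritten_text:
--         return False
--
--     text_lower = rewritten_text.lower()
--     for term in UNSAFE_REWRITE_OUTPUT_TERMS: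
--         if term in text_lower:
--             return False
--
--     return True
-- ===== SOURCE B (Python) =====
-- UNSAFE_REWRITE_OUTPUT_TERMS = [
--     "liability shall be limited",
--     "in no event shall",
--     "consequential damages",
--     "punitive damages",
--     "indirect damages",
--     "$",
-- ]
--
-- def validate_rewrite_output(rewritten_text: str) -> bool:
--     if not rewritten_text:
--         return False
--     # NFA-style multi-pattern matcher: walk the text once, maintaining the set of
--     # pattern suffixes still pending ("active states"); no substring primitive used.
--     states = []
--     for c in rewritten_text.lower():
--         new_states = []
--         for t in states + UNSAFE_REWRITE_OUTPUT_TERMS: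
--             if t and t[0] == c:
--                 new_states.append(t[1:])
--         if "" in new_states:
--             return False
--         states = new_states
--     return True
-- ===== Notes on version B (the rewrite author's own statement) =====
-- stated objective: alternative
-- what changed: Replaced the per-term substring-containment loop by an NFA-style simultaneous multi-pattern matcher: one character-by-character pass maintaining a set of pending pattern suffixes, with no substring primitive at all.
import Mathlib
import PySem

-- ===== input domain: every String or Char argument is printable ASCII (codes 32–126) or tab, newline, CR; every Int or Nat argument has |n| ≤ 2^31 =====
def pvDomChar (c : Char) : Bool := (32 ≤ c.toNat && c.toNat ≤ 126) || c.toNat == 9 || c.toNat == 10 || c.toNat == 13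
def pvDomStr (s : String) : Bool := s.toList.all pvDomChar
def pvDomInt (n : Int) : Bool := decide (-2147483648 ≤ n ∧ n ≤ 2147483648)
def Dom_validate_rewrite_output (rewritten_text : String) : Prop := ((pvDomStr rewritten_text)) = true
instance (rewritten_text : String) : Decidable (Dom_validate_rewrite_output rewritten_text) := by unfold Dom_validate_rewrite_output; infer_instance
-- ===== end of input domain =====

-- B replaces A's per-term substring-containment loop by an NFA-style multi-pattern
-- matcher: one pass over the characters maintaining the pending pattern suffixes;
-- objective: alternative (structurally different, similar cost).


-- module-level constant shared by both Pythons
def UNSAFE_REWRITE_OUTPUT_TERMS : List (List Char) :=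
  [ "liability shall be limited".toList,
    "in no event shall".toList,
    "consequential damages".toList,
    "punitive damages".toList,
    "indirect damages".toList,
    "$".toList ]

-- ===== PORT A =====
-- the for-loop over terms with early return on `term in text_lower`
def loopA : List (List Char) → List Char → Bool
  | [], _ => true
  | t :: ts, tl => if PySem.Chars.isIn t tl then false else loopA ts tl

def validate_rewrite_output (rewritten_text : String) : Bool :=
  if rewritten_text.toList.isEmpty then false
  else loopA UNSAFE_REWRITE_OUTPUT_TERMS (PySem.Chars.lower rewritten_text.toList)

-- ===== PORT B =====
-- one step of the matcher: advance every active state and every fresh term by c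
-- (the inner for-loop with its `if t and t[0] == c` filter and append)
def stepB (c : Char) (sts : List (List Char)) : List (List Char) :=
  (sts ++ UNSAFE_REWRITE_OUTPUT_TERMS).filterMap
    (fun t => match t with
      | [] => none
      | h :: rest => if h == c then some rest else none)

-- the outer for-loop over the lowered characters, with the `"" in new_states` early return
def runB (sts : List (List Char)) : List Char → Bool
  | [] => true
  | c :: rest =>
      let sts' := stepB c sts
      if sts'.contains [] then false else runB sts' rest

def validate_rewrite_output_alt (rewritten_text : String) : Bool :=
  if rewritten_text.toList.isEmpty then false
  else runB [] (PySem.Chars.lower rewritten_text.toList)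

-- ===== PRECONDITION & SPEC =====
def Spec_validate_rewrite_output (rewritten_text : String) (out : Bool) : Prop := out = validate_rewrite_output_alt rewritten_text
instance (rewritten_text : String) (out : Bool) : Decidable (Spec_validate_rewrite_output rewritten_text out) := by unfold Spec_validate_rewrite_output; infer_instance

-- ===== CLAIM (what is proved, stated in full; the proofs are below) =====
def Claim_equal_validate_rewrite_output : Prop := ∀ (rewritten_text : String), Dom_validate_rewrite_output rewritten_text → Spec_validate_rewrite_output rewritten_text (validate_rewrite_output rewritten_text)

-- ===== LEMMAS AND PROOFS =====

-- A's loop is the conjunction of not-contained over the terms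
theorem loopA_eq_all (ts : List (List Char)) (tl : List Char) :
    loopA ts tl = ts.all (fun t => !PySem.Chars.isIn t tl) := by
  induction ts with
  | nil => rfl
  | cons t ts ih =>
    simp only [loopA, List.all_cons, ih]
    by_cases h : PySem.Chars.isIn t tl = true
    · simp [h]
    · simp [Bool.eq_false_iff.mpr h]

-- membership in one matcher step
theorem mem_stepB (c : Char) (sts : List (List Char)) (s : List Char) :
    s ∈ stepB c sts ↔ (c :: s) ∈ sts ++ UNSAFE_REWRITE_OUTPUT_TERMS := by
  unfold stepB
  rw [List.mem_filterMap]
  constructor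
  · rintro ⟨t, ht, hm⟩
    cases t with
    | nil => simp at hm
    | cons h rest =>
      by_cases hc : h = c
      · subst hc
        simp only [BEq.rfl, if_pos] at hm
        cases hm
        exact ht
      · simp [hc] at hm
  · intro h
    exact ⟨c :: s, h, by simp⟩

-- the matcher run rejects exactly when a pending state is a prefix of the rest of the
-- input or some term occurs inside it
theorem runB_eq_false_iff (cs : List Char) (sts : List (List Char))
    (hne : [] ∉ sts) :
    runB sts cs = false ↔
      (∃ s ∈ sts, s <+: cs) ∨ (∃ t ∈ UNSAFE_REWRITE_OUTPUT_TERMS, t <:+: cs) := by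
  induction cs generalizing sts with
  | nil =>
    simp only [runB]
    constructor
    · intro h; exact absurd h (by simp)
    · rintro (⟨s, hs, hp⟩ | ⟨t, ht, hi⟩)
      · exact absurd (List.prefix_nil.mp hp ▸ hs) hne
      · have : t = [] := List.eq_nil_of_infix_nil hi
        subst this; revert ht; decide
  | cons c rest ih =>
    simp only [runB]
    by_cases hz : (stepB c sts).contains []
    · rw [if_pos hz]
      simp only [List.contains_eq_mem, decide_eq_true_eq] at hz
      rw [mem_stepB] at hz
      constructor
      · intro _
        rcases List.mem_append.mp hz with h | h
        · exact Or.inl ⟨[c], h, ⟨rest, rfl⟩⟩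
        · exact Or.inr ⟨[c], h, ⟨[], rest, rfl⟩⟩
      · intro _; rfl
    · rw [if_neg hz]
      simp only [List.contains_eq_mem, decide_eq_true_eq] at hz
      rw [ih _ hz]
      constructor
      · rintro (⟨s, hs, hp⟩ | ⟨t, ht, hi⟩)
        · have hp' : c :: s <+: c :: rest := List.cons_prefix_cons.mpr ⟨rfl, hp⟩
          rcases List.mem_append.mp ((mem_stepB c sts s).mp hs) with h | h
          · exact Or.inl ⟨c :: s, h, hp'⟩
          · exact Or.inr ⟨c :: s, h, hp'.isInfix⟩
        · exact Or.inr ⟨t, ht, hi.trans (List.suffix_cons c rest).isInfix⟩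
      · rintro (⟨s, hs, hp⟩ | ⟨t, ht, hi⟩)
        · cases s with
          | nil => exact absurd hs hne
          | cons c' s' =>
            rw [List.cons_prefix_cons] at hp
            obtain ⟨he, hp'⟩ := hp
            rw [he] at hs
            exact Or.inl ⟨s', (mem_stepB c sts s').mpr (List.mem_append_left _ hs), hp'⟩
        · rcases List.infix_cons_iff.mp hi with hp | hi'
          · cases t with
            | nil => exact absurd ht (by decide)
            | cons c' t' =>
              rw [List.cons_prefix_cons] at hp
              obtain ⟨he, hp'⟩ := hp
              rw [he] at ht
              exact Or.inl ⟨t', (mem_stepB c sts t').mpr (List.mem_append_right _ ht), hp'⟩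
          · exact Or.inr ⟨t, ht, hi'⟩

-- hence B's run from the empty state set equals A's conjunction over the terms
theorem runB_nil_eq_all (tl : List Char) :
    runB [] tl = UNSAFE_REWRITE_OUTPUT_TERMS.all (fun t => !PySem.Chars.isIn t tl) := by
  by_cases h : runB [] tl = false
  · rw [h]
    rcases (runB_eq_false_iff tl [] (by simp)).mp h with ⟨s, hs, _⟩ | ⟨t, ht, hi⟩
    · simp at hs
    · symm; rw [List.all_eq_false]
      exact ⟨t, ht, by simp [(PySem.Chars.isIn_iff_infix t tl).mpr hi]⟩
  · rw [Bool.not_eq_false] at h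
    rw [h]; symm
    rw [List.all_eq_true]
    intro t ht
    by_contra hc
    simp only [Bool.not_eq_true, Bool.not_eq_false'] at hc
    have hi := (PySem.Chars.isIn_iff_infix t tl).mp hc
    have : runB [] tl = false :=
      (runB_eq_false_iff tl [] (by simp)).mpr (Or.inr ⟨t, ht, hi⟩)
    rw [h] at this; exact absurd this (by simp)

-- ===== VERDICT (by name: the statement is the Claim_ definition above) =====
theorem validate_rewrite_output_spec : Claim_equal_validate_rewrite_output := by
  intro s _
  unfold Spec_validate_rewrite_output validate_rewrite_output validate_rewrite_output_alt
  by_cases h : s.toList.isEmpty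
  · simp [h]
  · simp only [h, if_neg, Bool.false_eq_true, not_false_eq_true]
    rw [loopA_eq_all, runB_nil_eq_all]
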